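-- pv_equiv track=rewrite | github.com/mctils12-arch/voltradeai | ml_model_v2.py | _find_entry_record
-- ===== SOURCE A (Python) =====
-- def _find_entry_record(records: list, ticker: str) -> int:
--     """Find the index of the most recent entry record for this ticker that
--     still has outcome=None (meaning it hasn't been closed yet).
--
--     Returns -1 if not found.
--     Searches backwards for efficiency (entries are usually recent).
--     """
--     for i in range(len(records) - 1, -1, -1):
--         r = records[i]
--         if r.get("ticker") != ticker:
--             continue
--         if r.get("outcome") is not None:
--             continue  # already closed
--         if r.get("pnl_pct") is not None:
--             continue  # already labeled
--         return i
--     return -1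
-- ===== SOURCE B (Python) =====
-- def _find_entry_record(records: list, ticker: str) -> int:
--     result = -1
--     for i, r in enumerate(records):
--         if r.get("ticker") == ticker and r.get("outcome") is None and r.get("pnl_pct") is None:
--             result = i
--     return result
-- ===== Notes on version B (the rewrite author's own statement) =====
-- stated objective: simpler
-- what changed: Replaced the backward index loop with early return by a single forward enumerate pass keeping the last matching index in an accumulator.
import Mathlib
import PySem

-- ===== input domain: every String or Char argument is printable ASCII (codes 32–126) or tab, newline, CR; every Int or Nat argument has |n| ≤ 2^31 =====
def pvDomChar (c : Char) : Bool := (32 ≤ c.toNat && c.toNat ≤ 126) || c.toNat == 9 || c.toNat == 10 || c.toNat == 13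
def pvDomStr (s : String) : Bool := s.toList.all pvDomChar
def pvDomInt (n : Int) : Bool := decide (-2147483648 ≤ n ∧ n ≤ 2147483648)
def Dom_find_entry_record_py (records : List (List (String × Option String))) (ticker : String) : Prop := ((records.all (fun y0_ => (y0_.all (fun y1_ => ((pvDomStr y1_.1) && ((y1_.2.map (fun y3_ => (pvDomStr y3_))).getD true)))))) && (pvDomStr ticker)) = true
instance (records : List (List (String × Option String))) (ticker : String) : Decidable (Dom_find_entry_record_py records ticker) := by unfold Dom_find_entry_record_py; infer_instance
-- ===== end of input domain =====

-- ===== PORT A =====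
-- B changes the decomposition: a forward pass keeping the last matching index, instead of A's backward scan with early return (objective: simpler).
-- Python r.get(k) on dict[str, Optional[str]]: 'is None' ⇔ key absent or value None, i.e. the joined lookup is none.
def pvGetJ (r : List (String × Option String)) (k : String) : Option String :=
  ((PySem.Dict.mk r).get? k).join

-- A's loop: for i in range(len(records)-1, -1, -1), continue-chain, return i on match.
def pvGoA (records : List (List (String × Option String))) (ticker : String) : Nat → Int
  | 0 => -1
  | n + 1 =>
    let r := records.getD n []
    if pvGetJ r "ticker" != some ticker then pvGoA records ticker n
    else if (pvGetJ r "outcome").isSome then pvGoA records ticker n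
    else if (pvGetJ r "pnl_pct").isSome then pvGoA records ticker n
    else (n : Int)

def find_entry_record_py (records : List (List (String × Option String))) (ticker : String) : Int :=
  pvGoA records ticker records.length

-- ===== PORT B =====
-- the combined condition of Source B's single if
def pvCond (ticker : String) (r : List (String × Option String)) : Bool :=
  (pvGetJ r "ticker" == some ticker) && (pvGetJ r "outcome").isNone && (pvGetJ r "pnl_pct").isNone

-- Source B's forward enumerate loop with accumulator result = -1
def pvFwd (ticker : String) : List (List (String × Option String)) → Int → Int → Int
  | [], _, acc => acc
  | r :: rs, i, acc => pvFwd ticker rs (i + 1) (if pvCond ticker r then i else acc)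

def find_entry_record_py_alt (records : List (List (String × Option String))) (ticker : String) : Int :=
  pvFwd ticker records 0 (-1)

-- ===== PRECONDITION & SPEC =====
def Spec_find_entry_record_py (records : List (List (String × Option String))) (ticker : String) (out : Int) : Prop := out = find_entry_record_py_alt records ticker
instance (records : List (List (String × Option String))) (ticker : String) (out : Int) : Decidable (Spec_find_entry_record_py records ticker out) := by unfold Spec_find_entry_record_py; infer_instance

-- ===== CLAIM (what is proved, stated in full; the proofs are below) =====
def Claim_equal_find_entry_record_py : Prop := ∀ (records : List (List (String × Option String))) (ticker : String), Dom_find_entry_record_py records ticker → Spec_find_entry_record_py records ticker (find_entry_record_py records ticker)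

-- ===== LEMMAS AND PROOFS =====

-- A's step n+1 tests exactly B's combined condition on records[n]
theorem pvGoA_succ (records : List (List (String × Option String))) (ticker : String) (n : Nat) :
    pvGoA records ticker (n + 1) =
      if pvCond ticker (records.getD n []) then (n : Int) else pvGoA records ticker n := by
  have key : ∀ (r : List (String × Option String)),
      (if pvGetJ r "ticker" != some ticker then pvGoA records ticker n
       else if (pvGetJ r "outcome").isSome then pvGoA records ticker n
       else if (pvGetJ r "pnl_pct").isSome then pvGoA records ticker n
       else (n : Int)) =
        if pvCond ticker r then (n : Int) else pvGoA records ticker n := by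
    intro r
    by_cases h1 : pvGetJ r "ticker" = some ticker
    · cases h2 : pvGetJ r "outcome" <;> cases h3 : pvGetJ r "pnl_pct" <;>
        simp [pvCond, h1, h2, h3]
    · simp [pvCond, h1]
  simpa only [pvGoA] using key (records.getD n [])

-- appending one record to the forward pass: it wins iff it matches
theorem pvFwd_append_one (ticker : String) (l : List (List (String × Option String)))
    (r : List (String × Option String)) (i acc : Int) :
    pvFwd ticker (l ++ [r]) i acc =
      if pvCond ticker r then i + l.length else pvFwd ticker l i acc := by
  induction l generalizing i acc with
  | nil => simp [pvFwd]
  | cons x xs ih =>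
    simp only [List.cons_append, pvFwd, ih, List.length_cons]
    split
    · push_cast; ring
    · rfl

theorem pvGoA_eq_fwd_take (records : List (List (String × Option String))) (ticker : String)
    (n : Nat) (hn : n ≤ records.length) :
    pvGoA records ticker n = pvFwd ticker (records.take n) 0 (-1) := by
  induction n with
  | zero => simp [pvGoA, pvFwd]
  | succ m ih =>
    have hm : m < records.length := Nat.lt_of_succ_le hn
    have htake : records.take (m + 1) = records.take m ++ [records.getD m []] := by
      rw [List.getD_eq_getElem records [] hm, List.take_add_one, List.getElem?_eq_getElem hm]
      simp
    rw [pvGoA_succ, htake, pvFwd_append_one, ih (Nat.le_of_lt hm)]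
    simp [List.length_take, Nat.min_eq_left (Nat.le_of_lt hm)]

-- ===== VERDICT (by name: the statement is the Claim_ definition above) =====
theorem find_entry_record_py_spec : Claim_equal_find_entry_record_py := by
  intro records ticker _
  unfold Spec_find_entry_record_py find_entry_record_py find_entry_record_py_alt
  rw [pvGoA_eq_fwd_take records ticker records.length (le_refl _), List.take_length]
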